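-- pv_equiv track=rewrite | github.com/peaky76/advent_of_code_2021 | day_8/app.py | get_segment_occurrences_by_pattern_length
-- ===== SOURCE A (Python) =====
-- def get_segment_occurrences_by_pattern_length(patterns):
--     segment_occurrence_dict = {}
--     for letter in list('abcdefg'):
--         segment_occurrence_dict[letter] = []
--         for p in patterns:
--             if letter in list(p):
--                 segment_occurrence_dict[letter] += str(len(p))
--     for k, v in segment_occurrence_dict.items():
--         segment_occurrence_dict[k] = ''.join(sorted(v))
--     return segment_occurrence_dict
-- ===== SOURCE B (Python) =====
-- def get_segment_occurrences_by_pattern_length(patterns):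
--     buckets = {letter: [] for letter in 'abcdefg'}
--     for p in patterns:
--         s = str(len(p))
--         for ch in set(p):
--             if ch in buckets:
--                 buckets[ch].extend(s)
--     return {k: ''.join(sorted(v)) for k, v in buckets.items()}
-- ===== Notes on version B (the rewrite author's own statement) =====
-- stated objective: faster
-- what changed: A gathers per-letter by rescanning all patterns seven times (with an O(len p) list(p) membership test each time); B makes one pass over the patterns, scattering the length digits of each pattern into per-letter buckets via a dict and set(p), then sorts each bucket once.
import Mathlib
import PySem

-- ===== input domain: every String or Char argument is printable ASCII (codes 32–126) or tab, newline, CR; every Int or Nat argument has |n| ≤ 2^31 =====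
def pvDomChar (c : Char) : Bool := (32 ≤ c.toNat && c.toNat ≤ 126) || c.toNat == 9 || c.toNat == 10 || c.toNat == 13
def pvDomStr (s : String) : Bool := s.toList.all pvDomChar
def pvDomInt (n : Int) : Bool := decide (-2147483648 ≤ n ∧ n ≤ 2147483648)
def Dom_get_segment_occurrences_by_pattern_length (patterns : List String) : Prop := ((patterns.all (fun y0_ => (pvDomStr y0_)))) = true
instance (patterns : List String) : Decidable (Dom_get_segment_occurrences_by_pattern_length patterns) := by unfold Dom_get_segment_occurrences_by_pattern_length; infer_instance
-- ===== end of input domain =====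

-- B replaces A's seven rescans of the pattern list (one per segment letter) by a single pass that
-- scatters each pattern's length digits into per-letter buckets; objective: faster (constant factor).


-- ===== PORT A =====
-- The Python dict gets seven FRESH distinct single-letter keys in order, so it is the association
-- list appended to in the same order; `dict[letter] += str(len(p))` accumulates the digit characters
-- of len(p) into the just-inserted entry; the second loop overwrites each entry in place.
def get_segment_occurrences_by_pattern_length (patterns : List String) : List (String × String) :=
  let d : List (String × List Char) :=
    "abcdefg".toList.foldl
      (fun d letter =>
        d ++ [(String.ofList [letter],
          patterns.foldl
            (fun v p => if letter ∈ p.toList then v ++ PySem.Int.toChars (PySem.Str.len p) else v)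
            [])])
      []
  d.foldl (fun out kv => out ++ [(kv.1, String.ofList (PySem.List.sorted kv.2 (fun c => c) false))]) []

-- ===== PORT B =====
-- Iterating set(p) only extends per-letter buckets, so the result does not depend on the set's
-- iteration order; set(p) is ported as PySem.Set.ofList.
def get_segment_occurrences_by_pattern_length_alt (patterns : List String) : List (String × String) :=
  let init : PySem.Dict Char (List Char) :=
    PySem.Dict.ofList ("abcdefg".toList.map (fun letter => (letter, ([] : List Char))))
  let buckets := patterns.foldl
    (fun b p =>
      let s := PySem.Int.toChars (PySem.Str.len p)
      (PySem.Set.ofList p.toList).foldl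
        (fun b ch => if b.contains ch then b.modify ch [] (fun v => v ++ s) else b) b)
    init
  buckets.items.map (fun kv => (String.ofList [kv.1], String.ofList (PySem.List.sorted kv.2 (fun c => c) false)))

-- ===== PRECONDITION & SPEC =====
def Spec_get_segment_occurrences_by_pattern_length (patterns : List String) (out : List (String × String)) : Prop := out = get_segment_occurrences_by_pattern_length_alt patterns
instance (patterns : List String) (out : List (String × String)) : Decidable (Spec_get_segment_occurrences_by_pattern_length patterns out) := by unfold Spec_get_segment_occurrences_by_pattern_length; infer_instance

-- ===== CLAIM (what is proved, stated in full; the proofs are below) =====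
def Claim_equal_get_segment_occurrences_by_pattern_length : Prop := ∀ (patterns : List String), Dom_get_segment_occurrences_by_pattern_length patterns → Spec_get_segment_occurrences_by_pattern_length patterns (get_segment_occurrences_by_pattern_length patterns)

-- ===== LEMMAS AND PROOFS =====

-- one pattern's inner loop over set(p): contains is preserved
theorem pv_inner_contains (s : List Char) (d : List Char) (b : PySem.Dict Char (List Char)) (x : Char) :
    ((s.foldl (fun b ch => if b.contains ch then b.modify ch [] (fun v => v ++ d) else b) b).contains x)
      = b.contains x := by
  induction s generalizing b with
  | nil => rfl
  | cons ch s ih =>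
    simp only [List.foldl_cons]
    by_cases h : b.contains ch = true
    · rw [h, if_pos rfl, ih, PySem.Dict.contains_modify]
      by_cases hx : x = ch
      · subst hx; simp [h]
      · simp [hx]
    · rw [Bool.not_eq_true] at h; rw [h]; simp only [Bool.false_eq_true, if_false]; exact ih b

-- one pattern's inner loop: the bucket of l gains d exactly when l is a contained member of s
theorem pv_inner_getD (s : List Char) (hs : s.Nodup) (d : List Char)
    (b : PySem.Dict Char (List Char)) (l : Char) :
    ((s.foldl (fun b ch => if b.contains ch then b.modify ch [] (fun v => v ++ d) else b) b).getD l [])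
      = b.getD l [] ++ (if b.contains l = true ∧ l ∈ s then d else []) := by
  induction s generalizing b with
  | nil => simp
  | cons ch s ih =>
    rcases List.nodup_cons.mp hs with ⟨hch, hs'⟩
    simp only [List.foldl_cons]
    by_cases h : b.contains ch = true
    · rw [h, if_pos rfl, ih hs']
      rw [PySem.Dict.contains_modify, PySem.Dict.getD_modify]
      by_cases hl : l = ch
      · subst hl
        simp [h, hch]
      · by_cases hc : b.contains l = true
        · simp [hc, hl, List.mem_cons]
        · simp [hc, hl]
    · rw [Bool.not_eq_true] at h; rw [h]; simp only [Bool.false_eq_true, if_false]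
      rw [ih hs' b]
      by_cases hl : l = ch
      · subst hl; simp [h, hch]
      · simp [hl, List.mem_cons]

-- one pattern's inner loop: keys are preserved
theorem pv_inner_keys (s : List Char) (d : List Char) (b : PySem.Dict Char (List Char)) :
    ((s.foldl (fun b ch => if b.contains ch then b.modify ch [] (fun v => v ++ d) else b) b).keys)
      = b.keys := by
  induction s generalizing b with
  | nil => rfl
  | cons ch s ih =>
    simp only [List.foldl_cons]
    by_cases h : b.contains ch = true
    · rw [h, if_pos rfl, ih, PySem.Dict.keys_modify, PySem.Dict.keys_insert_of_contains (h := h)]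
    · rw [Bool.not_eq_true] at h; rw [h]; simp only [Bool.false_eq_true, if_false]; exact ih b

-- the outer loop over patterns: bucket l collects the length digits of every pattern containing l
theorem pv_outer_getD (patterns : List String) (b : PySem.Dict Char (List Char)) (l : Char) :
    ((patterns.foldl
        (fun b p =>
          (PySem.Set.ofList p.toList).foldl
            (fun b ch => if b.contains ch then b.modify ch [] (fun v => v ++ PySem.Int.toChars (PySem.Str.len p)) else b) b)
        b).getD l [])
      = b.getD l [] ++ patterns.flatMap
          (fun p => if b.contains l = true ∧ l ∈ p.toList then PySem.Int.toChars (PySem.Str.len p) else []) := by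
  induction patterns generalizing b with
  | nil => simp
  | cons p ps ih =>
    simp only [List.foldl_cons, List.flatMap_cons]
    rw [ih, pv_inner_getD _ (PySem.Set.nodup_ofList _) _ b l]
    rw [pv_inner_contains]
    simp only [PySem.Set.mem_ofList, List.append_assoc]

-- the outer loop: keys are preserved
theorem pv_outer_keys (patterns : List String) (b : PySem.Dict Char (List Char)) :
    ((patterns.foldl
        (fun b p =>
          (PySem.Set.ofList p.toList).foldl
            (fun b ch => if b.contains ch then b.modify ch [] (fun v => v ++ PySem.Int.toChars (PySem.Str.len p)) else b) b)
        b).keys)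
      = b.keys := by
  induction patterns generalizing b with
  | nil => rfl
  | cons p ps ih => simp only [List.foldl_cons]; rw [ih, pv_inner_keys]

-- B's initial buckets: every lookup is [] and the seven letters are the keys
theorem pv_init_eq :
    (PySem.Dict.ofList ("abcdefg".toList.map (fun letter => (letter, ([] : List Char)))))
      = PySem.Dict.mk [('a',[]),('b',[]),('c',[]),('d',[]),('e',[]),('f',[]),('g',[])] := rfl

theorem pv_init_getD (l : Char) :
    (PySem.Dict.ofList ("abcdefg".toList.map (fun letter => (letter, ([] : List Char))))).getD l [] = [] := by
  rw [pv_init_eq]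
  simp [PySem.Dict.getD_eq_get?_getD, PySem.Dict.get?_mk_cons]
  split_ifs <;> rfl

theorem pv_init_contains (l : Char) (hl : l ∈ "abcdefg".toList) :
    (PySem.Dict.ofList ("abcdefg".toList.map (fun letter => (letter, ([] : List Char))))).contains l = true := by
  rw [PySem.Dict.contains_eq_decide_mem_keys]
  have hk : (PySem.Dict.ofList ("abcdefg".toList.map (fun letter => (letter, ([] : List Char))))).keys
      = "abcdefg".toList := rfl
  rw [hk]; simpa using hl

-- A's inner loop over all patterns, as a flatMap
theorem pv_gather (patterns : List String) (letter : Char) :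
    patterns.foldl
        (fun v p => if letter ∈ p.toList then v ++ PySem.Int.toChars (PySem.Str.len p) else v) []
      = patterns.flatMap (fun p => if letter ∈ p.toList then PySem.Int.toChars (PySem.Str.len p) else []) := by
  have h : (fun (v : List Char) (p : String) =>
        if letter ∈ p.toList then v ++ PySem.Int.toChars (PySem.Str.len p) else v)
      = fun v p => v ++ (if letter ∈ p.toList then PySem.Int.toChars (PySem.Str.len p) else []) := by
    funext v p; split <;> simp
  rw [h, PySem.List.foldl_append_eq_flatMap]; rfl

-- ===== VERDICT (by name: the statement is the Claim_ definition above) =====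
theorem get_segment_occurrences_by_pattern_length_spec : Claim_equal_get_segment_occurrences_by_pattern_length := by
  intro patterns _
  unfold Spec_get_segment_occurrences_by_pattern_length
  unfold get_segment_occurrences_by_pattern_length get_segment_occurrences_by_pattern_length_alt
  dsimp only
  -- A side: the two append-singleton loops are maps
  rw [PySem.List.foldl_append_singleton_eq_map
      (f := fun letter => ((String.ofList [letter] : String),
        patterns.foldl
          (fun v p => if letter ∈ p.toList then v ++ PySem.Int.toChars (PySem.Str.len p) else v) [])),
    List.nil_append,
    PySem.List.foldl_append_singleton_eq_map
      (f := fun kv : String × List Char =>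
        (kv.1, String.ofList (PySem.List.sorted kv.2 (fun c => c) false))),
    List.nil_append, List.map_map]
  -- B side: items of the final dict, over its (unchanged) keys
  rw [PySem.Dict.items_eq_map_keys _ ?hnd []]
  case hnd =>
    rw [pv_outer_keys]
    rw [show (PySem.Dict.ofList ("abcdefg".toList.map (fun letter => (letter, ([] : List Char))))).keys
        = "abcdefg".toList from rfl]
    decide
  rw [pv_outer_keys]
  rw [show (PySem.Dict.ofList ("abcdefg".toList.map (fun letter => (letter, ([] : List Char))))).keys
      = "abcdefg".toList from rfl]
  rw [List.map_map]
  apply List.map_congr_left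
  intro l hl
  simp only [Function.comp_apply]
  rw [pv_outer_getD, pv_init_getD, List.nil_append, pv_gather]
  have hc : (PySem.Dict.ofList
      [('a',([]:List Char)),('b',[]),('c',[]),('d',[]),('e',[]),('f',[]),('g',[])]).contains l = true :=
    pv_init_contains l hl
  simp [hc]
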